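-- pv_equiv track=rewrite | github.com/psavery/tomviz | tomviz/python/generate-operator-docs.py | categorize_operators
-- ===== SOURCE A (Python) =====
-- from typing import Dict, List, Any, Optional
--
-- def categorize_operators(operators: List[Dict[str, Any]]) -> Dict[str, List[Dict[str, Any]]]:
--     """Categorize operators based on their names or labels."""
--     categories = {
--         'Reconstruction': [],
--         'Alignment': [],
--         'Filtering': [],
--         'Segmentation': [],
--         'Transformation': [],
--         'Analysis': [],
--         'Utilities': [],
--     }
--
--     for op in operators:
--         name = op.get('name', '').lower()
--         label = op.get('label', '').lower()
--
--         # Simple categorization based on keywords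
--         categorized = False
--
--         if any(kw in name or kw in label for kw in ['recon', 'reconstruct']):
--             categories['Reconstruction'].append(op)
--             categorized = True
--         elif any(kw in name or kw in label for kw in ['align', 'register', 'shift', 'rotation']):
--             categories['Alignment'].append(op)
--             categorized = True
--         elif any(kw in name or kw in label for kw in ['filter', 'denoise', 'smooth', 'median', 'gaussian', 'noise']):
--             categories['Filtering'].append(op)
--             categorized = True
--         elif any(kw in name or kw in label for kw in ['segment', 'threshold', 'label']):
--             categories['Segmentation'].append(op)
--             categorized = True
--         elif any(kw in name or kw in label for kw in ['crop', 'pad', 'resample', 'bin', 'rotate', 'swap', 'transpose']):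
--             categories['Transformation'].append(op)
--             categorized = True
--         elif any(kw in name or kw in label for kw in ['analyze', 'measure', 'calculate']):
--             categories['Analysis'].append(op)
--             categorized = True
--
--         if not categorized:
--             categories['Utilities'].append(op)
--
--     # Remove empty categories
--     return {k: v for k, v in categories.items() if v}
-- ===== SOURCE B (Python) =====
-- from typing import Dict, List, Any
--
-- _TABLE = [
--     ('Reconstruction', ['recon', 'reconstruct']),
--     ('Alignment', ['align', 'register', 'shift', 'rotation']),
--     ('Filtering', ['filter', 'denoise', 'smooth', 'median', 'gaussian', 'noise']),
--     ('Segmentation', ['segment', 'threshold', 'label']),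
--     ('Transformation', ['crop', 'pad', 'resample', 'bin', 'rotate', 'swap', 'transpose']),
--     ('Analysis', ['analyze', 'measure', 'calculate']),
-- ]
--
--
-- def _category(op: Dict[str, Any]) -> str:
--     name = op.get('name', '').lower()
--     label = op.get('label', '').lower()
--     for cat, kws in _TABLE:
--         if any(kw in name or kw in label for kw in kws):
--             return cat
--     return 'Utilities'
--
--
-- def categorize_operators(operators: List[Dict[str, Any]]) -> Dict[str, List[Dict[str, Any]]]:
--     """Categorize operators based on their names or labels."""
--     result = {}
--     for cat, _ in _TABLE + [('Utilities', [])]: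
--         bucket = [op for op in operators if _category(op) == cat]
--         if bucket:
--             result[cat] = bucket
--     return result
-- ===== Notes on version B (the rewrite author's own statement) =====
-- stated objective: alternative
-- what changed: Replaces the single-pass if/elif ladder that mutates a pre-built category dict with a data-driven (category, keywords) table, a first-match classifier helper, and one filter pass per category that builds the result dict directly in category order, skipping empty buckets.
import Mathlib
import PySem

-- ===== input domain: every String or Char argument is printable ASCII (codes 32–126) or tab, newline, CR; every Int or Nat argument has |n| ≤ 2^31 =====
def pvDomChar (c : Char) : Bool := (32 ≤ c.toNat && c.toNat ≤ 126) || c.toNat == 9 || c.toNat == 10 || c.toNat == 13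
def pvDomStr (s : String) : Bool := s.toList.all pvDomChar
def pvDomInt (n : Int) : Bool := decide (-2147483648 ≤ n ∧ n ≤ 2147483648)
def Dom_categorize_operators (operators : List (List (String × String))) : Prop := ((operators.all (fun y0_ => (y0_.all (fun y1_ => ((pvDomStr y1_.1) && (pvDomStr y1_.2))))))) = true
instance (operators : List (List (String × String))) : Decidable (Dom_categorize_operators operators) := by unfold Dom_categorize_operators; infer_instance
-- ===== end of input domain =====

-- B replaces A's single-pass if/elif ladder with a keyword TABLE and one filter pass per category (objective: idiomatic/alternative; not faster).

-- ===== PORT A =====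
def categorize_operators (operators : List (List (String × String))) : List (String × List (List (String × String))) :=
  let categories : PySem.Dict String (List (List (String × String))) :=
    PySem.Dict.mk [("Reconstruction", []), ("Alignment", []), ("Filtering", []),
      ("Segmentation", []), ("Transformation", []), ("Analysis", []), ("Utilities", [])]
  let final := operators.foldl (fun cats op =>
    let d := PySem.Dict.mk op
    let name := PySem.Str.lower (d.getD "name" "")
    let label := PySem.Str.lower (d.getD "label" "")
    if ["recon", "reconstruct"].any (fun kw => PySem.Str.isIn kw name || PySem.Str.isIn kw label) then
      cats.insert "Reconstruction" (cats.getD "Reconstruction" [] ++ [op])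
    else if ["align", "register", "shift", "rotation"].any (fun kw => PySem.Str.isIn kw name || PySem.Str.isIn kw label) then
      cats.insert "Alignment" (cats.getD "Alignment" [] ++ [op])
    else if ["filter", "denoise", "smooth", "median", "gaussian", "noise"].any (fun kw => PySem.Str.isIn kw name || PySem.Str.isIn kw label) then
      cats.insert "Filtering" (cats.getD "Filtering" [] ++ [op])
    else if ["segment", "threshold", "label"].any (fun kw => PySem.Str.isIn kw name || PySem.Str.isIn kw label) then
      cats.insert "Segmentation" (cats.getD "Segmentation" [] ++ [op])
    else if ["crop", "pad", "resample", "bin", "rotate", "swap", "transpose"].any (fun kw => PySem.Str.isIn kw name || PySem.Str.isIn kw label) then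
      cats.insert "Transformation" (cats.getD "Transformation" [] ++ [op])
    else if ["analyze", "measure", "calculate"].any (fun kw => PySem.Str.isIn kw name || PySem.Str.isIn kw label) then
      cats.insert "Analysis" (cats.getD "Analysis" [] ++ [op])
    else
      cats.insert "Utilities" (cats.getD "Utilities" [] ++ [op])) categories
  -- dict comprehension keeping non-empty values (keys are distinct, insertion order)
  final.items.filter (fun kv => !kv.2.isEmpty)

-- ===== PORT B =====
def pvTable : List (String × List String) :=
  [("Reconstruction", ["recon", "reconstruct"]),
   ("Alignment", ["align", "register", "shift", "rotation"]),
   ("Filtering", ["filter", "denoise", "smooth", "median", "gaussian", "noise"]),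
   ("Segmentation", ["segment", "threshold", "label"]),
   ("Transformation", ["crop", "pad", "resample", "bin", "rotate", "swap", "transpose"]),
   ("Analysis", ["analyze", "measure", "calculate"])]

def pvCategory (op : List (String × String)) : String :=
  let d := PySem.Dict.mk op
  let name := PySem.Str.lower (d.getD "name" "")
  let label := PySem.Str.lower (d.getD "label" "")
  match pvTable.find? (fun e => e.2.any (fun kw => PySem.Str.isIn kw name || PySem.Str.isIn kw label)) with
  | some e => e.1
  | none => "Utilities"

def categorize_operators_alt (operators : List (List (String × String))) : List (String × List (List (String × String))) :=
  (pvTable ++ [("Utilities", [])]).foldl (fun result (e : String × List String) =>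
    let bucket := operators.filter (fun op => pvCategory op == e.1)
    if bucket.isEmpty then result else result ++ [(e.1, bucket)]) []

-- ===== PRECONDITION & SPEC =====
def Spec_categorize_operators (operators : List (List (String × String))) (out : List (String × List (List (String × String)))) : Prop := out = categorize_operators_alt operators
instance (operators : List (List (String × String))) (out : List (String × List (List (String × String)))) : Decidable (Spec_categorize_operators operators out) := by unfold Spec_categorize_operators; infer_instance

-- ===== CLAIM (what is proved, stated in full; the proofs are below) =====
def Claim_equal_categorize_operators : Prop := ∀ (operators : List (List (String × String))), Dom_categorize_operators operators → Spec_categorize_operators operators (categorize_operators operators)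

-- ===== LEMMAS AND PROOFS =====

-- kws.any over op's lowered name/label (shared normal form of both ports' match tests)
def pvMatch (op : List (String × String)) (kws : List String) : Bool :=
  let d := PySem.Dict.mk op
  let name := PySem.Str.lower (d.getD "name" "")
  let label := PySem.Str.lower (d.getD "label" "")
  kws.any (fun kw => PySem.Str.isIn kw name || PySem.Str.isIn kw label)

-- A's fold body, restated through pvMatch (definitionally equal to the lambda in categorize_operators)
def pvStepA (cats : PySem.Dict String (List (List (String × String)))) (op : List (String × String)) :
    PySem.Dict String (List (List (String × String))) :=
  if pvMatch op ["recon", "reconstruct"] then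
    cats.insert "Reconstruction" (cats.getD "Reconstruction" [] ++ [op])
  else if pvMatch op ["align", "register", "shift", "rotation"] then
    cats.insert "Alignment" (cats.getD "Alignment" [] ++ [op])
  else if pvMatch op ["filter", "denoise", "smooth", "median", "gaussian", "noise"] then
    cats.insert "Filtering" (cats.getD "Filtering" [] ++ [op])
  else if pvMatch op ["segment", "threshold", "label"] then
    cats.insert "Segmentation" (cats.getD "Segmentation" [] ++ [op])
  else if pvMatch op ["crop", "pad", "resample", "bin", "rotate", "swap", "transpose"] then
    cats.insert "Transformation" (cats.getD "Transformation" [] ++ [op])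
  else if pvMatch op ["analyze", "measure", "calculate"] then
    cats.insert "Analysis" (cats.getD "Analysis" [] ++ [op])
  else
    cats.insert "Utilities" (cats.getD "Utilities" [] ++ [op])

def pvBuckets (ops : List (List (String × String))) : List (String × List (List (String × String))) :=
  (pvTable ++ [("Utilities", [])]).map (fun (e : String × List String) => (e.1, ops.filter (fun op => pvCategory op == e.1)))

def pvMkD (ops : List (List (String × String))) : PySem.Dict String (List (List (String × String))) :=
  PySem.Dict.mk (pvBuckets ops)

lemma pvCategory_eq (op : List (String × String)) :
    pvCategory op =
      if pvMatch op ["recon", "reconstruct"] then "Reconstruction"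
      else if pvMatch op ["align", "register", "shift", "rotation"] then "Alignment"
      else if pvMatch op ["filter", "denoise", "smooth", "median", "gaussian", "noise"] then "Filtering"
      else if pvMatch op ["segment", "threshold", "label"] then "Segmentation"
      else if pvMatch op ["crop", "pad", "resample", "bin", "rotate", "swap", "transpose"] then "Transformation"
      else if pvMatch op ["analyze", "measure", "calculate"] then "Analysis"
      else "Utilities" := by
  rw [show pvCategory op =
      (match List.find? (fun e : String × List String => pvMatch op e.2) pvTable with
        | some e => e.1
        | none => "Utilities") from rfl]
  simp only [pvTable]
  cases h1 : pvMatch op ["recon", "reconstruct"] with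
  | true => rw [List.find?_cons_of_pos (by exact h1)]; simp [h1]
  | false =>
  rw [List.find?_cons_of_neg (by simp [h1])]
  cases h2 : pvMatch op ["align", "register", "shift", "rotation"] with
  | true => rw [List.find?_cons_of_pos (by exact h2)]; simp [h2]
  | false =>
  rw [List.find?_cons_of_neg (by simp [h2])]
  cases h3 : pvMatch op ["filter", "denoise", "smooth", "median", "gaussian", "noise"] with
  | true => rw [List.find?_cons_of_pos (by exact h3)]; simp [h3]
  | false =>
  rw [List.find?_cons_of_neg (by simp [h3])]
  cases h4 : pvMatch op ["segment", "threshold", "label"] with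
  | true => rw [List.find?_cons_of_pos (by exact h4)]; simp [h4]
  | false =>
  rw [List.find?_cons_of_neg (by simp [h4])]
  cases h5 : pvMatch op ["crop", "pad", "resample", "bin", "rotate", "swap", "transpose"] with
  | true => rw [List.find?_cons_of_pos (by exact h5)]; simp [h5]
  | false =>
  rw [List.find?_cons_of_neg (by simp [h5])]
  cases h6 : pvMatch op ["analyze", "measure", "calculate"] with
  | true => rw [List.find?_cons_of_pos (by exact h6)]; simp [h6]
  | false =>
  rw [List.find?_cons_of_neg (by simp [h6])]
  simp

lemma pvStepA_mkD (l : List (List (String × String))) (op : List (String × String)) :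
    pvStepA (pvMkD l) op = pvMkD (l ++ [op]) := by
  simp only [pvStepA, pvMkD, pvBuckets, pvTable, List.filter_append]
  by_cases h1 : pvMatch op ["recon", "reconstruct"]
  · simp [h1, pvCategory_eq, List.filter, PySem.Dict.insert, PySem.Dict.getD, PySem.Dict.get?, PySem.Dict.contains]
  · by_cases h2 : pvMatch op ["align", "register", "shift", "rotation"]
    · simp [h1, h2, pvCategory_eq, List.filter, PySem.Dict.insert, PySem.Dict.getD, PySem.Dict.get?, PySem.Dict.contains]
    · by_cases h3 : pvMatch op ["filter", "denoise", "smooth", "median", "gaussian", "noise"]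
      · simp [h1, h2, h3, pvCategory_eq, List.filter, PySem.Dict.insert, PySem.Dict.getD, PySem.Dict.get?, PySem.Dict.contains]
      · by_cases h4 : pvMatch op ["segment", "threshold", "label"]
        · simp [h1, h2, h3, h4, pvCategory_eq, List.filter, PySem.Dict.insert, PySem.Dict.getD, PySem.Dict.get?, PySem.Dict.contains]
        · by_cases h5 : pvMatch op ["crop", "pad", "resample", "bin", "rotate", "swap", "transpose"]
          · simp [h1, h2, h3, h4, h5, pvCategory_eq, List.filter, PySem.Dict.insert, PySem.Dict.getD, PySem.Dict.get?, PySem.Dict.contains]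
          · by_cases h6 : pvMatch op ["analyze", "measure", "calculate"]
            · simp [h1, h2, h3, h4, h5, h6, pvCategory_eq, List.filter, PySem.Dict.insert, PySem.Dict.getD, PySem.Dict.get?, PySem.Dict.contains]
            · simp [h1, h2, h3, h4, h5, h6, pvCategory_eq, List.filter, PySem.Dict.insert, PySem.Dict.getD, PySem.Dict.get?, PySem.Dict.contains]

lemma pvLoop (ops l : List (List (String × String))) :
    ops.foldl pvStepA (pvMkD l) = pvMkD (l ++ ops) := by
  induction ops generalizing l with
  | nil => simp
  | cons op rest ih => simp [List.foldl, pvStepA_mkD, ih, List.append_assoc]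

lemma A_norm (ops : List (List (String × String))) :
    categorize_operators ops =
      (ops.foldl pvStepA (pvMkD [])).items.filter (fun kv => !kv.2.isEmpty) := rfl

lemma B_norm (ops : List (List (String × String))) :
    categorize_operators_alt ops =
      (pvBuckets ops).foldl
        (fun acc kv => if kv.2.isEmpty then acc else acc ++ [kv]) [] := rfl

lemma foldl_keep_nonempty (L : List (String × List (List (String × String))))
    (acc : List (String × List (List (String × String)))) :
    L.foldl (fun acc kv => if kv.2.isEmpty then acc else acc ++ [kv]) acc
      = acc ++ L.filter (fun kv => !kv.2.isEmpty) := by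
  have h := PySem.List.foldl_append_if_eq_filter
    (p := fun kv : String × List (List (String × String)) => !kv.2.isEmpty) (l := L) (acc := acc)
  rw [← h]
  congr 1
  funext a kv
  by_cases hk : kv.2.isEmpty <;> simp [hk]

-- ===== VERDICT (by name: the statement is the Claim_ definition above) =====
theorem categorize_operators_spec : Claim_equal_categorize_operators := by
  intro ops _
  unfold Spec_categorize_operators
  rw [A_norm, B_norm, pvLoop, foldl_keep_nonempty]
  rfl
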